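-- pv_equiv track=rewrite | github.com/prakashpawar4u/GenAI | FastAPI/logical.py | simplify_directions
-- ===== SOURCE A (Python) =====
-- def simplify_directions(directions):
--     # Define opposites of each direction
--     opposites = {"North": "South", "South": "North", "East": "West", "West": "East"}
--
--     # Initialize a stack to store the simplified path
--     stack = []
--
--     # Iterate over each direction
--     for direction in directions:
--         # If the stack is not empty and the current direction cancels the last one, pop the stack
--         if stack and stack[-1] == opposites.get(direction):
--             stack.pop()  # Remove the opposite direction
--         else:
--             # Otherwise, add the current direction to the stack
--             stack.append(direction)
--
--     return stack
-- ===== SOURCE B (Python) =====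
-- def simplify_directions(directions):
--     opposites = {"North": "South", "South": "North", "East": "West", "West": "East"}
--     result = list(directions)
--     changed = True
--     while changed:
--         changed = False
--         for i in range(len(result) - 1):
--             if result[i] == opposites.get(result[i + 1]):
--                 del result[i:i + 2]
--                 changed = True
--                 break
--     return result
-- ===== Notes on version B (the rewrite author's own statement) =====
-- stated objective: alternative
-- what changed: Replaces the one-pass stack with a fixed-point reducer that repeatedly deletes the first adjacent cancelling pair (found with the same opposites dict) until a full scan finds none; works on a copy, input not mutated.
import Mathlib
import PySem

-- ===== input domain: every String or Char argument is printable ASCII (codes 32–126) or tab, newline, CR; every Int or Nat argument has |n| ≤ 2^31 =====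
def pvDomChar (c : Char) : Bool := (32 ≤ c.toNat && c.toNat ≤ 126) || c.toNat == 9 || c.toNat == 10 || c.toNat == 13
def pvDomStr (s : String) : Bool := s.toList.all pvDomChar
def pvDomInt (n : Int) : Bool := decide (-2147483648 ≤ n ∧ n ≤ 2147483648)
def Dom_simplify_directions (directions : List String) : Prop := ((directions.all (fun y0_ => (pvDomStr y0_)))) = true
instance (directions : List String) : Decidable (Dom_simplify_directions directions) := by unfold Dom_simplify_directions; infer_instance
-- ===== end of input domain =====

-- B replaces A's one-pass stack with a fixed-point reducer that repeatedly deletes the first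
-- adjacent cancelling pair until no pair remains (alternative decomposition, same results).


-- ===== PORT A =====
-- opposites = {"North": "South", "South": "North", "East": "West", "West": "East"}
def pvOpposites : PySem.Dict String String :=
  PySem.Dict.ofList [("North", "South"), ("South", "North"), ("East", "West"), ("West", "East")]

-- one loop iteration of A: stack kept top-first (Python appends/pops at the end)
def pvStep (stack : List String) (direction : String) : List String :=
  match stack with
  | top :: rest =>
      if some top = pvOpposites.get? direction then rest else direction :: top :: rest
  | [] => [direction]

def simplify_directions (directions : List String) : List String :=
  (directions.foldl pvStep []).reverse

-- ===== PORT B =====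
-- inner for-loop of B: remove the first adjacent cancelling pair, none if a full scan finds none
def pvFindPair : List String → Option (List String)
  | a :: b :: r =>
      if some a = pvOpposites.get? b then some r else (pvFindPair (b :: r)).map (a :: ·)
  | _ => none

theorem pvFindPair_length : ∀ (xs ys : List String), pvFindPair xs = some ys → ys.length < xs.length
  | [], _, h => by simp [pvFindPair] at h
  | [_], _, h => by simp [pvFindPair] at h
  | a :: b :: r, ys, h => by
      by_cases hc : some a = pvOpposites.get? b
      · simp [pvFindPair, hc] at h
        simp [← h]
      · simp only [pvFindPair, if_neg hc, Option.map_eq_some_iff] at h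
        obtain ⟨zs, hz, rfl⟩ := h
        have := pvFindPair_length (b :: r) zs hz
        simp at this ⊢
        omega

-- while-loop of B: repeat until a scan removes nothing
def simplify_directions_alt (directions : List String) : List String :=
  match h : pvFindPair directions with
  | some ys => simplify_directions_alt ys
  | none => directions
termination_by directions.length
decreasing_by exact pvFindPair_length _ _ h

-- ===== PRECONDITION & SPEC =====
def Spec_simplify_directions (directions : List String) (out : List String) : Prop := out = simplify_directions_alt directions
instance (directions : List String) (out : List String) : Decidable (Spec_simplify_directions directions out) := by unfold Spec_simplify_directions; infer_instance

-- ===== CLAIM (what is proved, stated in full; the proofs are below) =====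
def Claim_equal_simplify_directions : Prop := ∀ (directions : List String), Dom_simplify_directions directions → Spec_simplify_directions directions (simplify_directions directions)

-- ===== LEMMAS AND PROOFS =====

-- the opposites table is an involution
theorem pvOpp_invol (a b : String) (h : pvOpposites.get? b = some a) :
    pvOpposites.get? a = some b := by
  by_cases h1 : b = "North"
  · subst h1
    rw [show pvOpposites.get? "North" = some "South" from by decide] at h
    obtain rfl : a = "South" := (Option.some.inj h).symm
    decide
  · by_cases h2 : b = "South"
    · subst h2
      rw [show pvOpposites.get? "South" = some "North" from by decide] at h
      obtain rfl : a = "North" := (Option.some.inj h).symm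
      decide
    · by_cases h3 : b = "East"
      · subst h3
        rw [show pvOpposites.get? "East" = some "West" from by decide] at h
        obtain rfl : a = "West" := (Option.some.inj h).symm
        decide
      · by_cases h4 : b = "West"
        · subst h4
          rw [show pvOpposites.get? "West" = some "East" from by decide] at h
          obtain rfl : a = "East" := (Option.some.inj h).symm
          decide
        · have g1 : ¬"North" = b := fun e => h1 e.symm
          have g2 : ¬"South" = b := fun e => h2 e.symm
          have g3 : ¬"East" = b := fun e => h3 e.symm
          have g4 : ¬"West" = b := fun e => h4 e.symm
          rw [show pvOpposites = PySem.Dict.mk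
              [("North", "South"), ("South", "North"), ("East", "West"), ("West", "East")]
            from by decide] at h
          simp [PySem.Dict.get?, g1, g2, g3, g4] at h

-- invariant of A's stack: no two adjacent entries cancel (top-first)
def pvInv : List String → Prop
  | x :: y :: t => some y ≠ pvOpposites.get? x ∧ pvInv (y :: t)
  | _ => True

theorem pvInv_tail (x : String) (t : List String) (h : pvInv (x :: t)) : pvInv t := by
  cases t with
  | nil => trivial
  | cons y r => exact h.2

theorem pvStep_inv (s : List String) (d : String) (h : pvInv s) : pvInv (pvStep s d) := by
  cases s with
  | nil => trivial
  | cons t s' =>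
      simp only [pvStep]
      split
      · exact pvInv_tail t s' h
      · exact ⟨by simpa using ‹¬ some t = pvOpposites.get? d›, h⟩

-- a cancelling pair fed to A's stack is a no-op
theorem pvStep_cancel (s : List String) (a b : String) (hinv : pvInv s)
    (hab : pvOpposites.get? b = some a) : pvStep (pvStep s a) b = s := by
  have hba : pvOpposites.get? a = some b := pvOpp_invol a b hab
  cases s with
  | nil => simp [pvStep, hab]
  | cons t s' =>
      by_cases hc : some t = pvOpposites.get? a
      · obtain rfl : t = b := by rw [hba] at hc; exact Option.some.inj hc
        rw [show pvStep (t :: s') a = s' from by simp [pvStep, hc]]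
        cases s' with
        | nil => simp [pvStep]
        | cons u s'' =>
            have hne : some u ≠ pvOpposites.get? t := hinv.1
            simp [pvStep, hne]
      · simp [pvStep, hc, hab]

theorem pvRun_cancel (s : List String) (a b : String) (r : List String) (hinv : pvInv s)
    (hab : pvOpposites.get? b = some a) :
    List.foldl pvStep s (a :: b :: r) = List.foldl pvStep s r := by
  simp only [List.foldl_cons]
  rw [pvStep_cancel s a b hinv hab]

-- removing the first cancelling pair does not change A's stack
theorem pvRun_findPair : ∀ (xs ys s : List String), pvInv s → pvFindPair xs = some ys →
    List.foldl pvStep s xs = List.foldl pvStep s ys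
  | [], _, _, _, h => by simp [pvFindPair] at h
  | [_], _, _, _, h => by simp [pvFindPair] at h
  | a :: b :: r, ys, s, hinv, h => by
      by_cases hc : some a = pvOpposites.get? b
      · simp only [pvFindPair, if_pos hc] at h
        obtain rfl : r = ys := by simpa using h
        exact pvRun_cancel s a b _ hinv hc.symm
      · simp only [pvFindPair, if_neg hc, Option.map_eq_some_iff] at h
        obtain ⟨zs, hz, rfl⟩ := h
        simp only [List.foldl_cons]
        exact pvRun_findPair (b :: r) zs (pvStep s a) (pvStep_inv s a hinv) hz

-- on a pair-free list the stack just reverses it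
theorem pvRun_noPair : ∀ (xs s : List String), pvFindPair xs = none → pvInv s →
    (∀ t x, s.head? = some t → xs.head? = some x → some t ≠ pvOpposites.get? x) →
    List.foldl pvStep s xs = xs.reverse ++ s
  | [], s, _, _, _ => by simp
  | x :: rest, s, hnp, hinv, hhd => by
      have hpush : pvStep s x = x :: s := by
        cases s with
        | nil => simp [pvStep]
        | cons t s' =>
            have := hhd t x rfl rfl
            simp [pvStep, this]
      simp only [List.foldl_cons, hpush]
      have hrest : pvFindPair rest = none := by
        cases rest with
        | nil => simp [pvFindPair]
        | cons y r =>
            simp only [pvFindPair] at hnp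
            by_cases hc : some x = pvOpposites.get? y
            · simp [hc] at hnp
            · simpa [hc] using hnp
      have hinv' : pvInv (x :: s) := by
        cases s with
        | nil => trivial
        | cons t s' => exact ⟨hhd t x rfl rfl, hinv⟩
      have hhd' : ∀ t y, (x :: s).head? = some t → rest.head? = some y →
          some t ≠ pvOpposites.get? y := by
        intro t y ht hy
        obtain rfl : x = t := by simpa using ht
        cases rest with
        | nil => exact absurd hy (by simp)
        | cons y' r =>
            have hyy : y' = y := by simpa using hy
            subst hyy
            simp only [pvFindPair] at hnp
            by_cases hc : some x = pvOpposites.get? y'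
            · rw [if_pos hc] at hnp; exact absurd hnp (by simp)
            · exact hc
      rw [pvRun_noPair rest (x :: s) hrest hinv' hhd']
      simp

theorem pvMain (xs : List String) :
    (List.foldl pvStep [] xs).reverse = simplify_directions_alt xs := by
  rw [simplify_directions_alt]
  cases h : pvFindPair xs with
  | none =>
      rw [pvRun_noPair xs [] h trivial (by intro t x ht; simp at ht)]
      simp
  | some ys =>
      rw [pvRun_findPair xs ys [] trivial h]
      exact pvMain ys
termination_by xs.length
decreasing_by exact pvFindPair_length _ _ h

-- ===== VERDICT (by name: the statement is the Claim_ definition above) =====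
theorem simplify_directions_spec : Claim_equal_simplify_directions := by
  intro directions _
  unfold Spec_simplify_directions simplify_directions
  exact pvMain directions
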